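-- pv_equiv track=rewrite | github.com/LuisAxel/GitItDone | aoc/2024/day_7/1.py | check_equation
-- ===== SOURCE A (Python) =====
-- from operator import add
-- from operator import mul
-- from collections import deque
--
-- def check_equation(target, operands):
--     if not operands:
--         return 0
--
--     operators = [add, mul]
--     queue = deque([[operands[0], 1]]) # curr value, next operand idx
--
--     while queue:
--         value, next_operand_idx = queue.popleft()
--
--         if next_operand_idx == len(operands) and value == target :
--             return target
--
--         if next_operand_idx >= len(operands):
--             continue
--
--         next_operand = operands[next_operand_idx]
--         for op in operators:
--             new_val = op(value, next_operand)
--             if new_val <= target: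
--                 queue.append([new_val, next_operand_idx + 1])
--
--     return 0
-- ===== SOURCE B (Python) =====
-- def check_equation(target, operands):
--     if not operands:
--         return 0
--     values = {operands[0]}
--     for op in operands[1:]:
--         values = {nv for v in values for nv in (v + op, v * op) if nv <= target}
--     return target if target in values else 0
-- ===== Notes on version B (the rewrite author's own statement) =====
-- stated objective: alternative
-- what changed: Replaced the BFS over a deque of (value, next-index) states with a layered set fold: one set of distinct reachable values per operand, deduplicating values so duplicate partial results are explored once.
import Mathlib
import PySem

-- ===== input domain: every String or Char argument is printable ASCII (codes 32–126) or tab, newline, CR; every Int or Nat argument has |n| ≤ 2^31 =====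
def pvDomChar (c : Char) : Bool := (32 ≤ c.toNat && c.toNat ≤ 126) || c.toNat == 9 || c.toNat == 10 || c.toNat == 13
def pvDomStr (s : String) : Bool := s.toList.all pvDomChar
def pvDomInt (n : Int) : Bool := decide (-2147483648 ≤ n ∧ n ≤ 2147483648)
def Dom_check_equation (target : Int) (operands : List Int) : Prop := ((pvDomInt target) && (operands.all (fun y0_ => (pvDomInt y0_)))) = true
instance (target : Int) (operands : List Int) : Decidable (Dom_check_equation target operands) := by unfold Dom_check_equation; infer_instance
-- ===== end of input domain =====

-- B replaces A's deque BFS over (value, next-index) states by a per-operand fold over a set of distinct reachable values (duplicates collapse); objective: alternative.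

-- ===== PORT A =====
-- queue weight: each pending state (v, i) weighs 3^(len+1-i); popping strictly decreases it
def pvMeasure (n : Nat) (q : List (Int × Nat)) : Nat :=
  (q.map (fun p => 3 ^ (n + 1 - p.2))).sum

theorem pvMeasure_append (n : Nat) (q r : List (Int × Nat)) :
    pvMeasure n (q ++ r) = pvMeasure n q + pvMeasure n r := by
  simp [pvMeasure]

-- append of one pruned child [(new_val, idx+1)] (the body of A's 'for op in operators' loop)
def pvChild (target w : Int) (i : Nat) : List (Int × Nat) :=
  if w ≤ target then [(w, i + 1)] else []

theorem pvMeasure_child (n : Nat) (t w : Int) (i : Nat) :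
    pvMeasure n (pvChild t w i) ≤ 3 ^ (n - i) := by
  unfold pvChild
  split <;> simp [pvMeasure]

-- the while-loop of A: pop front, test, push pruned children at the back
def pvBfs (target : Int) (operands : List Int) (q : List (Int × Nat)) : Int :=
  match q with
  | [] => 0
  | (v, i) :: rest =>
    if i = operands.length ∧ v = target then target
    else if operands.length ≤ i then pvBfs target operands rest
    else
      let o := (PySem.List.pyGet? operands (i : Int)).getD 0
      pvBfs target operands
        (rest ++ pvChild target (v + o) i ++ pvChild target (v * o) i)
termination_by pvMeasure operands.length q
decreasing_by
  · have h3 : 0 < 3 ^ (operands.length + 1 - i) := Nat.pow_pos (by norm_num)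
    simp only [pvMeasure, List.map_cons, List.sum_cons]
    omega
  · rename_i hlt
    rw [pvMeasure_append, pvMeasure_append]
    have hi : operands.length + 1 - i = (operands.length - i) + 1 := by omega
    have h3 : 0 < 3 ^ (operands.length - i) := Nat.pow_pos (by norm_num)
    have hc1 := pvMeasure_child operands.length target
      (v + (PySem.List.pyGet? operands (i : Int)).getD 0) i
    have hc2 := pvMeasure_child operands.length target
      (v * (PySem.List.pyGet? operands (i : Int)).getD 0) i
    have hhd : pvMeasure operands.length ((v, i) :: rest)
        = 3 ^ (operands.length + 1 - i) + pvMeasure operands.length rest := by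
      simp [pvMeasure]
    rw [hhd, hi, pow_succ]
    omega

def check_equation (target : Int) (operands : List Int) : Int :=
  if operands = [] then 0
  else pvBfs target operands [((PySem.List.pyGet? operands 0).getD 0, 1)]

-- ===== PORT B =====
-- one layer of B's fold: all pruned sums/products of the current value set with operand o
def pvStep (target : Int) (s : List Int) (o : Int) : List Int :=
  PySem.Set.ofList ((s.flatMap (fun v => [v + o, v * o])).filter (fun nv => nv ≤ target))

def check_equation_alt (target : Int) (operands : List Int) : Int :=
  match operands with
  | [] => 0
  | x :: rest =>
    let final := rest.foldl (fun s o => pvStep target s o) (PySem.Set.ofList [x])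
    if target ∈ final then target else 0

-- ===== PRECONDITION & SPEC =====
def Spec_check_equation (target : Int) (operands : List Int) (out : Int) : Prop := out = check_equation_alt target operands
instance (target : Int) (operands : List Int) (out : Int) : Decidable (Spec_check_equation target operands out) := by unfold Spec_check_equation; infer_instance

-- ===== CLAIM (what is proved, stated in full; the proofs are below) =====
def Claim_equal_check_equation : Prop := ∀ (target : Int) (operands : List Int), Dom_check_equation target operands → Spec_check_equation target operands (check_equation target operands)

-- ===== LEMMAS AND PROOFS =====

-- pruned forward reachability of target from value v through the remaining operands
def pvG (target v : Int) : List Int → Bool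
  | [] => decide (v = target)
  | o :: os =>
    (if v + o ≤ target then pvG target (v + o) os else false)
      || (if v * o ≤ target then pvG target (v * o) os else false)

theorem mem_pvStep (target o w : Int) (s : List Int) :
    w ∈ pvStep target s o ↔ (∃ v ∈ s, w = v + o ∨ w = v * o) ∧ w ≤ target := by
  constructor
  · intro hw
    rw [pvStep, PySem.Set.mem_ofList, List.mem_filter] at hw
    obtain ⟨h1, h2⟩ := hw
    rw [List.mem_flatMap] at h1
    obtain ⟨v, hv, hvw⟩ := h1
    simp only [List.mem_cons, List.not_mem_nil, or_false] at hvw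
    exact ⟨⟨v, hv, hvw⟩, by simpa using h2⟩
  · rintro ⟨⟨v, hv, hvw⟩, hle⟩
    rw [pvStep, PySem.Set.mem_ofList, List.mem_filter]
    refine ⟨List.mem_flatMap.mpr ⟨v, hv, ?_⟩, by simpa⟩
    rcases hvw with h | h <;> subst h <;> simp

theorem pvB_fold (target : Int) (os : List Int) :
    ∀ s : List Int,
      (target ∈ os.foldl (fun s o => pvStep target s o) s)
        ↔ ∃ v ∈ s, pvG target v os = true := by
  induction os with
  | nil => intro s; simp [pvG, eq_comm]
  | cons o os ih =>
    intro s
    rw [List.foldl_cons, ih]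
    constructor
    · rintro ⟨w, hw, hG⟩
      obtain ⟨⟨v, hv, hvw⟩, hle⟩ := (mem_pvStep target o w s).mp hw
      refine ⟨v, hv, ?_⟩
      rcases hvw with h | h <;> subst h <;> simp [pvG, hle, hG]
    · rintro ⟨v, hv, hG⟩
      simp only [pvG, Bool.or_eq_true] at hG
      rcases hG with h | h
      · by_cases hle : v + o ≤ target
        · exact ⟨v + o, (mem_pvStep target o (v + o) s).mpr ⟨⟨v, hv, Or.inl rfl⟩, hle⟩,
            by simpa [hle] using h⟩
        · simp [hle] at h
      · by_cases hle : v * o ≤ target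
        · exact ⟨v * o, (mem_pvStep target o (v * o) s).mpr ⟨⟨v, hv, Or.inr rfl⟩, hle⟩,
            by simpa [hle] using h⟩
        · simp [hle] at h

theorem pvChild_snd {t w : Int} {i : Nat} {p : Int × Nat} (hp : p ∈ pvChild t w i) :
    p.2 = i + 1 := by
  unfold pvChild at hp
  split at hp
  · simp only [List.mem_cons, List.not_mem_nil, or_false] at hp
    simp [hp]
  · simp at hp

theorem pvBfs_eq (target : Int) (operands : List Int) (q : List (Int × Nat))
    (hq : ∀ p ∈ q, p.2 ≤ operands.length) :
    pvBfs target operands q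
      = if q.any (fun p => pvG target p.1 (operands.drop p.2)) then target else 0 := by
  induction q using pvBfs.induct target operands with
  | case1 => simp [pvBfs]
  | case2 v i rest h =>
    obtain ⟨hi, hv⟩ := h
    rw [pvBfs]
    simp [hi, hv, List.any_cons, List.drop_length, pvG]
  | case3 v i rest h hge ih =>
    rw [pvBfs]
    have hi : i = operands.length := le_antisymm (hq (v, i) (by simp)) hge
    have hvne : ¬ v = target := fun hv => h ⟨hi, hv⟩
    rw [if_neg h, if_pos hge, ih (fun p hp => hq p (List.mem_cons_of_mem _ hp))]
    subst hi
    have hd : List.drop operands.length operands = ([] : List Int) := List.drop_length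
    simp only [List.any_cons, hd, pvG, hvne, decide_false, Bool.false_or]
  | case4 v i rest h hlt o ih =>
    rw [not_le] at hlt
    rw [pvBfs, if_neg h, if_neg (not_le.mpr hlt)]
    rw [ih (by
      intro p hp
      simp only [List.mem_append] at hp
      rcases hp with (hp | hp) | hp
      · exact hq p (List.mem_cons_of_mem _ hp)
      · rw [pvChild_snd hp]; omega
      · rw [pvChild_snd hp]; omega)]
    have ho : o = operands[i] := by
      simp only [o, PySem.List.pyGet?, PySem.List.pyIdx?]
      rw [if_pos (by positivity), if_pos (by exact_mod_cast hlt)]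
      simp [List.getElem?_eq_getElem hlt]
    have hdrop : operands.drop i = operands[i] :: operands.drop (i + 1) :=
      List.drop_eq_getElem_cons hlt
    have hG : pvG target v (operands.drop i)
        = ((if v + o ≤ target then pvG target (v + o) (operands.drop (i + 1)) else false)
          || (if v * o ≤ target then pvG target (v * o) (operands.drop (i + 1)) else false)) := by
      rw [hdrop, ← ho]; rfl
    have hany1 : (pvChild target (v + o) i).any
        (fun p => pvG target p.1 (operands.drop p.2))
        = (if v + o ≤ target then pvG target (v + o) (operands.drop (i + 1)) else false) := by
      unfold pvChild; split <;> simp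
    have hany2 : (pvChild target (v * o) i).any
        (fun p => pvG target p.1 (operands.drop p.2))
        = (if v * o ≤ target then pvG target (v * o) (operands.drop (i + 1)) else false) := by
      unfold pvChild; split <;> simp
    simp only [List.any_append, List.any_cons, hany1, hany2, hG]
    congr 1
    simp [Bool.or_comm, Bool.or_left_comm, Bool.or_assoc]

-- ===== VERDICT (by name: the statement is the Claim_ definition above) =====
theorem check_equation_spec : Claim_equal_check_equation := by
  intro target operands _
  unfold Spec_check_equation check_equation check_equation_alt
  cases operands with
  | nil => simp
  | cons x rest =>
    simp only [if_neg (List.cons_ne_nil x rest)]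
    rw [pvBfs_eq target (x :: rest) _ (by simp)]
    have h0 : (PySem.List.pyGet? (x :: rest) 0).getD 0 = x := by
      simp [PySem.List.pyGet?, PySem.List.pyIdx?]
    have hmem : (target ∈ rest.foldl (fun s o => pvStep target s o) (PySem.Set.ofList [x]))
        ↔ pvG target x rest = true := by
      rw [pvB_fold]
      constructor
      · rintro ⟨v, hv, hG⟩
        simp [PySem.Set.ofList] at hv
        exact hv ▸ hG
      · intro hG
        exact ⟨x, by simp [PySem.Set.ofList], hG⟩
    simp only [h0, List.any_cons, List.any_nil, Bool.or_false, List.drop_succ_cons,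
      List.drop_zero]
    by_cases hG : pvG target x rest = true
    · rw [if_pos hG, if_pos (hmem.mpr hG)]
    · rw [if_neg hG, if_neg (fun hm => hG (hmem.mp hm))]
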